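-- pv_equiv track=rewrite | github.com/Workwrite-Niidome/voynich-manuscript-analysis | empty_stem_analysis.py | analyze_collocations
-- ===== SOURCE A (Python) =====
-- from collections import defaultdict, Counter
--
-- def analyze_collocations(words_data, target_word, window=2):
--     """Analyze what words appear near a target word."""
--     neighbors_before = Counter()
--     neighbors_after = Counter()
--
--     word_list = [w['word'] for w in words_data]
--
--     for i, w in enumerate(word_list):
--         if w == target_word:
--             for j in range(max(0, i-window), i):
--                 neighbors_before[word_list[j]] += 1
--             for j in range(i+1, min(len(word_list), i+window+1)):
--                 neighbors_after[word_list[j]] += 1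
--
--     return neighbors_before, neighbors_after
-- ===== SOURCE B (Python) =====
-- from collections import Counter
--
-- def analyze_collocations(words_data, target_word, window=2):
--     """Analyze what words appear near a target word."""
--     word_list = [w['word'] for w in words_data]
--     n = len(word_list)
--     win = max(window, 0)  # a non-positive window has no neighbors
--     # prefix[k] = number of target occurrences among word_list[:k]
--     prefix = [0]
--     run = 0
--     for w in word_list:
--         run += (w == target_word)
--         prefix.append(run)
--     neighbors_before = Counter()
--     neighbors_after = Counter()
--     for k, wd in enumerate(word_list):
--         # targets strictly to the right of k within the window see wd "before" them
--         right = prefix[min(n, k + win + 1)] - prefix[k + 1]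
--         if right:
--             neighbors_before[wd] += right
--         # targets strictly to the left of k within the window see wd "after" them
--         left = prefix[k] - prefix[max(0, k - win)]
--         if left:
--             neighbors_after[wd] += left
--     return neighbors_before, neighbors_after
-- ===== Notes on version B (the rewrite author's own statement) =====
-- stated objective: faster
-- what changed: A scatters from each target occurrence, walking the whole window around every target (target-centric nested loops); B makes one pass building a prefix-sum array of target occurrences and then, for each word position, adds the number of nearby targets (computed as a prefix difference) to that word's counter in O(1), gathering word-centrically.
import Mathlib
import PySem

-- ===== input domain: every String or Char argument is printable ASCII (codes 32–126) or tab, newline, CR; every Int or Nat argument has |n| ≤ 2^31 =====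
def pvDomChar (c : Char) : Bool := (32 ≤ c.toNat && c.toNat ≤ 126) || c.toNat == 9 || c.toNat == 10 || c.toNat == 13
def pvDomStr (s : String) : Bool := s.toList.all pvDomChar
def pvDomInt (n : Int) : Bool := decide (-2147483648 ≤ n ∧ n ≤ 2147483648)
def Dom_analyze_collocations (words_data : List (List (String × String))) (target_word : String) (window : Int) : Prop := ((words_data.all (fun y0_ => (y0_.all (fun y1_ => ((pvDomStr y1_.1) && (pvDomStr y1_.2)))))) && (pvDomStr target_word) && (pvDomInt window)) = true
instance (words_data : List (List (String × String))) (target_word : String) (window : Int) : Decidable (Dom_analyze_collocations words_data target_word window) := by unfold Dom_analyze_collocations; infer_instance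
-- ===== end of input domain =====

-- B replaces A's target-centric window walk by a word-centric gather over a prefix-sum array
-- of target occurrences; proved to return equal results, including Counter key order.

-- ===== PORT A =====
def analyze_collocations (words_data : List (List (String × String))) (target_word : String) (window : Int) : (List (String × Int)) × (List (String × Int)) :=
  let word_list := words_data.map (fun w => (PySem.Dict.mk w).getD "word" "")
  let st :=
    (PySem.List.enumerate word_list 0).foldl
      (fun (st : PySem.Dict String Int × PySem.Dict String Int) p =>
        if p.2 == target_word then
          ((PySem.List.pyRange (max 0 (p.1 - window)) p.1 1).foldl
              (fun d j => d.modify (PySem.List.pyGetD word_list j "") 0 (· + 1)) st.1,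
           (PySem.List.pyRange (p.1 + 1) (min (PySem.List.len word_list) (p.1 + window + 1)) 1).foldl
              (fun d j => d.modify (PySem.List.pyGetD word_list j "") 0 (· + 1)) st.2)
        else st)
      (PySem.Dict.empty, PySem.Dict.empty)
  (st.1.items, st.2.items)

-- ===== PORT B =====
def analyze_collocations_alt (words_data : List (List (String × String))) (target_word : String) (window : Int) : (List (String × Int)) × (List (String × Int)) :=
  let word_list := words_data.map (fun w => (PySem.Dict.mk w).getD "word" "")
  let n := PySem.List.len word_list
  let win := max window 0
  -- prefix[k] = number of target occurrences among word_list[:k]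
  let pr := word_list.foldl
      (fun (st : List Int × Int) w =>
        let run := st.2 + (if w == target_word then 1 else 0)
        (st.1 ++ [run], run))
      ([(0 : Int)], 0)
  let pfx := pr.1
  let st := (PySem.List.enumerate word_list 0).foldl
      (fun (st : PySem.Dict String Int × PySem.Dict String Int) p =>
        let right := PySem.List.pyGetD pfx (min n (p.1 + win + 1)) 0 - PySem.List.pyGetD pfx (p.1 + 1) 0
        let left := PySem.List.pyGetD pfx p.1 0 - PySem.List.pyGetD pfx (max 0 (p.1 - win)) 0
        (if right ≠ 0 then st.1.modify p.2 0 (· + right) else st.1,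
         if left ≠ 0 then st.2.modify p.2 0 (· + left) else st.2))
      (PySem.Dict.empty, PySem.Dict.empty)
  (st.1.items, st.2.items)

-- ===== PRECONDITION & SPEC =====
-- Pre_ excludes exactly the inputs where some element dict lacks the key 'word' (Python A raises KeyError there, and so does B).
def Pre_analyze_collocations (words_data : List (List (String × String))) (target_word : String) (window : Int) : Prop :=
  ∀ w ∈ words_data, (PySem.Dict.mk w).contains "word" = true
instance (words_data : List (List (String × String))) (target_word : String) (window : Int) : Decidable (Pre_analyze_collocations words_data target_word window) := by unfold Pre_analyze_collocations; infer_instance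

def pvWitness_analyze_collocations : (List (List (String × String))) × String × Int :=
  ([[("word", "a")], [("word", "T")], [("word", "b")]], "T", 1)

def Spec_analyze_collocations (words_data : List (List (String × String))) (target_word : String) (window : Int) (out : (List (String × Int)) × (List (String × Int))) : Prop := out = analyze_collocations_alt words_data target_word window
instance (words_data : List (List (String × String))) (target_word : String) (window : Int) (out : (List (String × Int)) × (List (String × Int))) : Decidable (Spec_analyze_collocations words_data target_word window out) := by unfold Spec_analyze_collocations; infer_instance

-- ===== CLAIM (what is proved, stated in full; the proofs are below) =====
def Claim_equal_analyze_collocations : Prop := ∀ (words_data : List (List (String × String))) (target_word : String) (window : Int), Dom_analyze_collocations words_data target_word window → Pre_analyze_collocations words_data target_word window → Spec_analyze_collocations words_data target_word window (analyze_collocations words_data target_word window)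

-- ===== LEMMAS AND PROOFS =====

-- ---------- generic list/fold plumbing ----------

-- A's loop updates the two counter components independently under one shared test: split the pair-state fold.
theorem pv_foldl_pair_split {α γ δ : Type} (l : List α) (pred : α → Bool)
    (F : γ → α → γ) (G : δ → α → δ) (d1 : γ) (d2 : δ) :
    l.foldl (fun (st : γ × δ) p => if pred p then (F st.1 p, G st.2 p) else st) (d1, d2)
    = (l.foldl (fun d p => if pred p then F d p else d) d1,
       l.foldl (fun d p => if pred p then G d p else d) d2) := by
  induction l generalizing d1 d2 with
  | nil => rfl
  | cons x xs ih =>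
    simp only [List.foldl_cons]
    by_cases h : pred x = true
    · simp [h, ih]
    · simp [h, ih]

-- A conditional inner fold over g p equals one fold over the flattened filtered list.
theorem pv_foldl_if_flatMap {α β γ : Type} (l : List α) (pred : α → Bool)
    (g : α → List β) (f : γ → β → γ) (d : γ) :
    l.foldl (fun d p => if pred p then (g p).foldl f d else d) d
    = ((l.filter pred).flatMap g).foldl f d := by
  induction l generalizing d with
  | nil => rfl
  | cons x xs ih =>
    by_cases h : pred x = true
    · simp [h, ih, List.foldl_append]
    · simp [h, ih]

theorem pv_foldl_flatMap {α β γ : Type} (l : List α) (g : α → List β) (f : γ → β → γ) (init : γ) :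
    (l.flatMap g).foldl f init = l.foldl (fun acc x => (g x).foldl f acc) init := by
  induction l generalizing init with
  | nil => rfl
  | cons x xs ih => simp [List.foldl_append, ih]

theorem pv_flatMap_filter {α β : Type} (l : List α) (q : α → Bool) (g : α → List β) :
    (l.filter q).flatMap g = l.flatMap (fun x => if q x then g x else []) := by
  induction l with
  | nil => rfl
  | cons x xs ih =>
    by_cases h : q x = true
    · simp [h, ih]
    · simp [h, ih]

-- split a filter over an "old-or-new" test when every new element comes after every old one
theorem pv_filter_or_append {α : Type} (l : List α) (p r : α → Bool)
    (hord : l.Pairwise (fun x y => ¬(r x = true ∧ p y = true)))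
    (hdisj : ∀ x ∈ l, ¬(p x = true ∧ r x = true)) :
    l.filter (fun x => p x || r x) = l.filter p ++ l.filter r := by
  induction l with
  | nil => rfl
  | cons a l ih =>
    have h1 := (List.pairwise_cons.mp hord).1
    have h2 := (List.pairwise_cons.mp hord).2
    have hd := hdisj a (by simp)
    by_cases hp : p a = true
    · have hr : r a = false := by
        cases h : r a with
        | false => rfl
        | true => exact absurd ⟨hp, h⟩ hd
      simp only [List.filter_cons, hp, hr, Bool.or_false, Bool.true_or, if_true]
      rw [ih h2 (fun x hx => hdisj x (by simp [hx]))]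
      simp
    · by_cases hr : r a = true
      · have hnop : ∀ y ∈ l, ¬ p y = true := fun y hy => fun hpy => (h1 y hy) ⟨hr, hpy⟩
        have hfp : l.filter p = [] := List.filter_eq_nil_iff.mpr hnop
        have hflp : (a :: l).filter p = [] := by
          simp [List.filter_cons, hp, hfp]
        rw [hflp, List.nil_append]
        simp only [List.filter_cons, hr, hp, Bool.false_or, if_true]
        congr 1
        have hih := ih h2 (fun x hx => hdisj x (by simp [hx]))
        rw [hfp, List.nil_append] at hih
        exact hih
      · have hp' : p a = false := by cases h : p a with
          | false => rfl
          | true => exact absurd h hp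
        have hr' : r a = false := by cases h : r a with
          | false => rfl
          | true => exact absurd h hr
        simp only [List.filter_cons, hp', hr', Bool.or_false, if_false]
        exact ih h2 (fun x hx => hdisj x (by simp [hx]))

-- ---------- pyRange facts ----------

theorem pv_pyRange_empty (a b : Int) (h : b ≤ a) : PySem.List.pyRange a b = [] := by
  apply List.eq_nil_iff_forall_not_mem.mpr
  intro x hx
  rw [PySem.List.mem_pyRange_one] at hx
  omega

theorem pv_pyRange_pairwise (a b : Int) : (PySem.List.pyRange a b).Pairwise (· < ·) := by
  by_cases hab : b ≤ a
  · rw [pv_pyRange_empty a b hab]; exact List.Pairwise.nil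
  · induction hn : (b - a).toNat generalizing a with
    | zero => rw [pv_pyRange_empty a b (by omega)]; exact List.Pairwise.nil
    | succ n ih =>
      rw [PySem.List.pyRange_one_cons (by omega)]
      constructor
      · intro y hy; rw [PySem.List.mem_pyRange_one] at hy; omega
      · by_cases h2 : b ≤ a + 1
        · rw [pv_pyRange_empty (a+1) b h2]; exact List.Pairwise.nil
        · exact ih (a+1) (by omega) (by omega)

theorem pv_pyRange_nodup (a b : Int) : (PySem.List.pyRange a b).Nodup :=
  (pv_pyRange_pairwise a b).imp (fun h => ne_of_lt h)

theorem pv_pyRange_filter_between (a b lo hi : Int) :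
    (PySem.List.pyRange a b).filter (fun j => decide (lo ≤ j) && decide (j < hi))
      = PySem.List.pyRange (max a lo) (min b hi) := by
  by_cases hab : b ≤ a
  · rw [pv_pyRange_empty a b hab, pv_pyRange_empty _ _ (by omega)]; rfl
  · induction hn : (b - a).toNat generalizing a with
    | zero => omega
    | succ n ih =>
      rw [PySem.List.pyRange_one_cons (show a < b by omega)]
      have htail : (PySem.List.pyRange (a+1) b).filter (fun j => decide (lo ≤ j) && decide (j < hi))
          = PySem.List.pyRange (max (a+1) lo) (min b hi) := by
        by_cases h2 : b ≤ a + 1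
        · rw [pv_pyRange_empty (a+1) b h2, pv_pyRange_empty _ _ (by omega)]; rfl
        · exact ih (a+1) h2 (by omega)
      by_cases hmem : lo ≤ a ∧ a < hi
      · have hpred : (decide (lo ≤ a) && decide (a < hi)) = true := by
          simp [hmem.1, hmem.2]
        simp only [List.filter_cons, hpred, if_true]
        rw [htail, show max (a+1) lo = a + 1 by omega,
            show max a lo = a by omega,
            PySem.List.pyRange_one_cons (a := a) (b := min b hi) (by omega)]
      · have hpred : (decide (lo ≤ a) && decide (a < hi)) = false := by
          rcases not_and_or.mp hmem with h | h <;> simp [h]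
        simp only [List.filter_cons, hpred, Bool.false_eq_true, if_false]
        rw [htail]
        by_cases hlo : lo ≤ a
        · -- then hi ≤ a: both sides empty
          rw [pv_pyRange_empty _ _ (by omega), pv_pyRange_empty _ _ (by omega)]
        · rw [show max (a+1) lo = max a lo by omega]

-- ---------- scatter (A's event order) and gather (B's event order) ----------

def pvScat (P : Int → Bool) (lo hi : Int → Int) (m : Nat) : List Int :=
  (List.range m).flatMap (fun (i : Nat) => if P (i : Int) then PySem.List.pyRange (lo (i : Int)) (hi (i : Int)) else [])

def pvCov (P : Int → Bool) (lo hi : Int → Int) (m : Nat) (j : Int) : Bool :=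
  (List.range m).any (fun (i : Nat) => P (i : Int) && decide (lo (i : Int) ≤ j) && decide (j < hi (i : Int)))

def pvGath (c : Int → Nat) (m : Nat) : List Int :=
  (List.range m).flatMap (fun (j : Nat) => List.replicate (c (j : Int)) ((j : Int)))

theorem pv_mem_scat (P : Int → Bool) (lo hi : Int → Int) (m : Nat) (j : Int) :
    j ∈ pvScat P lo hi m ↔ pvCov P lo hi m j = true := by
  unfold pvScat pvCov
  rw [List.mem_flatMap, List.any_eq_true]
  constructor
  · rintro ⟨i, hi1, hi2⟩
    refine ⟨i, hi1, ?_⟩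
    by_cases hP : P (i : Int) = true
    · rw [if_pos hP] at hi2
      rw [PySem.List.mem_pyRange_one] at hi2
      simp [hP, hi2.1, hi2.2]
    · rw [if_neg hP] at hi2; cases hi2
  · rintro ⟨i, hi1, hi2⟩
    refine ⟨i, hi1, ?_⟩
    simp only [Bool.and_eq_true, decide_eq_true_eq] at hi2
    rw [if_pos hi2.1.1, PySem.List.mem_pyRange_one]
    exact ⟨hi2.1.2, hi2.2⟩

theorem pv_count_scat (P : Int → Bool) (lo hi : Int → Int) (j : Int) (m : Nat) :
    (pvScat P lo hi m).count j
      = ((List.range m).filter (fun (i : Nat) => P (i : Int) && decide (lo (i : Int) ≤ j) && decide (j < hi (i : Int)))).length := by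
  induction m with
  | zero => rfl
  | succ m ih =>
    rw [pvScat, List.range_succ, List.flatMap_append, List.count_append, ← pvScat, ih,
        List.filter_append, List.length_append]
    congr 1
    simp only [List.flatMap_cons, List.flatMap_nil, List.append_nil, List.filter_cons, List.filter_nil]
    by_cases hP : P (m : Int) = true
    · rw [if_pos hP]
      by_cases hmem : lo (m : Int) ≤ j ∧ j < hi (m : Int)
      · rw [List.count_eq_one_of_mem (pv_pyRange_nodup _ _) (by rw [PySem.List.mem_pyRange_one]; exact hmem)]
        simp [hP, hmem.1, hmem.2]
      · rw [List.count_eq_zero_of_not_mem (by rw [PySem.List.mem_pyRange_one]; exact hmem)]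
        have : (P (m:Int) && decide (lo (m:Int) ≤ j) && decide (j < hi (m:Int))) = false := by
          rcases not_and_or.mp hmem with h | h <;> simp [h]
        simp [this]
    · rw [if_neg hP]
      have hP' : P (m : Int) = false := by cases h : P (m:Int) with
        | false => rfl
        | true => exact absurd h hP
      simp [hP']
  termination_by m
    
theorem pv_count_gath (c : Int → Nat) (j : Int) (m : Nat) :
    (pvGath c m).count j = if 0 ≤ j ∧ j < (m : Int) then c j else 0 := by
  induction m with
  | zero =>
    simp only [pvGath, List.range_zero, List.flatMap_nil, List.count_nil]
    rw [if_neg (by omega)]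
  | succ m ih =>
    rw [pvGath, List.range_succ, List.flatMap_append, List.count_append, ← pvGath, ih]
    simp only [List.flatMap_cons, List.flatMap_nil, List.append_nil, List.count_replicate]
    by_cases hj : j = (m : Int)
    · subst hj
      rw [if_neg (by omega), if_pos (by simp), if_pos (by omega)]
      simp
    · have hne : ((m : Int) == j) = false := beq_eq_false_iff_ne.mpr (fun h => hj h.symm)
      simp only [hne, Bool.false_eq_true, if_false, add_zero]
      by_cases h0 : 0 ≤ j ∧ j < (m : Int)
      · rw [if_pos h0, if_pos (by omega)]
      · rw [if_neg h0, if_neg (by omega)]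

theorem pv_scat_perm_gath (P : Int → Bool) (lo hi : Int → Int) (c : Int → Nat) (m : Nat)
    (hB : ∀ i : Int, 0 ≤ i → i < (m : Int) → P i = true → 0 ≤ lo i ∧ hi i ≤ (m : Int))
    (Hc : ∀ k : Nat, k < m → c (k : Int)
        = ((List.range m).filter (fun (i : Nat) => P (i : Int) && decide (lo (i : Int) ≤ (k : Int)) && decide ((k : Int) < hi (i : Int)))).length) :
    (pvScat P lo hi m).Perm (pvGath c m) := by
  rw [List.perm_iff_count]
  intro j
  rw [pv_count_scat, pv_count_gath]
  by_cases hj : 0 ≤ j ∧ j < (m : Int)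
  · rw [if_pos hj]
    have hk : j = ((j.toNat : Nat) : Int) := by omega
    rw [hk, Hc j.toNat (by omega)]
  · rw [if_neg hj]
    rw [List.filter_eq_nil_iff.mpr ?_]
    · rfl
    · intro i hi'
      simp only [List.mem_range] at hi'
      intro hcontra
      simp only [Bool.and_eq_true, decide_eq_true_eq] at hcontra
      have := hB (i : Int) (by omega) (by push_cast; omega) hcontra.1.1
      omega

-- dedup (first-insertion key order): A's scatter, deduplicated, is the ascending list of covered positions
theorem pv_ofList_scat (P : Int → Bool) (lo hi : Int → Int) (m : Nat)
    (hB : ∀ i : Int, 0 ≤ i → i < (m : Int) → P i = true → 0 ≤ lo i ∧ hi i ≤ (m : Int))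
    (H : ∀ (i1 i2 j1 j2 : Int), 0 ≤ i1 → i1 < (m : Int) → P i1 = true → lo i1 ≤ j1 → j1 < hi i1 →
        0 ≤ i2 → i2 < (m : Int) → P i2 = true → lo i2 ≤ j2 → j2 < hi i2 → j2 < j1 →
        ∃ i : Int, i ≤ i1 ∧ 0 ≤ i ∧ i < (m : Int) ∧ P i = true ∧ lo i ≤ j2 ∧ j2 < hi i) :
    ∀ mm : Nat, mm ≤ m →
      PySem.Set.ofList (pvScat P lo hi mm) = (PySem.List.pyRange 0 (m : Int)).filter (pvCov P lo hi mm) := by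
  intro mm
  induction mm with
  | zero =>
    intro _
    rw [show pvScat P lo hi 0 = [] from rfl, PySem.Set.ofList_nil]
    symm
    apply List.filter_eq_nil_iff.mpr
    intro j _
    simp [pvCov]
  | succ mm ih =>
    intro hmm
    have ihe := ih (by omega)
    have hcontains : ∀ y, PySem.Set.contains (PySem.Set.ofList (pvScat P lo hi mm)) y = pvCov P lo hi mm y := by
      intro y
      rw [Bool.eq_iff_iff, PySem.Set.contains_iff, PySem.Set.mem_ofList, pv_mem_scat]
    have hsplit : pvScat P lo hi (mm+1)
        = pvScat P lo hi mm ++ (if P (mm : Int) = true then PySem.List.pyRange (lo (mm : Int)) (hi (mm : Int)) else []) := by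
      rw [pvScat, List.range_succ, List.flatMap_append, ← pvScat]
      simp
    have hcov : ∀ j : Int, pvCov P lo hi (mm+1) j
        = (pvCov P lo hi mm j || (P (mm : Int) && decide (lo (mm : Int) ≤ j) && decide (j < hi (mm : Int)))) := by
      intro j
      rw [pvCov, List.range_succ, List.any_append, ← pvCov]
      simp
    rw [hsplit]
    by_cases hP : P (mm : Int) = true
    · rw [if_pos hP, PySem.Set.ofList_append, PySem.Set.update_eq_append_filter, ihe,
          PySem.Set.ofList_eq_self_of_nodup _ (pv_pyRange_nodup _ _)]
      have hblockfilter :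
          (PySem.List.pyRange (lo (mm : Int)) (hi (mm : Int))).filter
              (fun y => !PySem.Set.contains (List.filter (pvCov P lo hi mm) (PySem.List.pyRange 0 (m : Int))) y)
            = (PySem.List.pyRange (lo (mm : Int)) (hi (mm : Int))).filter (fun y => !pvCov P lo hi mm y) := by
        apply List.filter_congr
        intro y _
        rw [← ihe, hcontains]
      rw [hblockfilter]
      -- now compute the right-hand side
      symm
      have hstep1 : (PySem.List.pyRange 0 (m : Int)).filter (pvCov P lo hi (mm+1))
          = (PySem.List.pyRange 0 (m : Int)).filter
              (fun j => pvCov P lo hi mm j || ((decide (lo (mm : Int) ≤ j) && decide (j < hi (mm : Int))) && !pvCov P lo hi mm j)) := by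
        apply List.filter_congr
        intro j _
        rw [hcov j, hP]
        cases h : pvCov P lo hi mm j <;> simp
      rw [hstep1]
      rw [pv_filter_or_append _ _ _ ?hord ?hdisj]
      case hdisj =>
        intro x _
        rintro ⟨hp1, hr1⟩
        simp [hp1] at hr1
      case hord =>
        apply (pv_pyRange_pairwise 0 (m : Int)).imp
        intro x y hxy
        rintro ⟨hrx, hpy⟩
        simp only [Bool.and_eq_true, Bool.not_eq_true', decide_eq_true_eq] at hrx
        obtain ⟨⟨hx1, hx2⟩, hxcov⟩ := hrx
        -- y is covered by some target i' < mm
        have hpy' : ∃ i' : Nat, i' < mm ∧ P (i' : Int) = true ∧ lo (i' : Int) ≤ y ∧ y < hi (i' : Int) := by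
          unfold pvCov at hpy
          rw [List.any_eq_true] at hpy
          obtain ⟨i', hi1', hi2'⟩ := hpy
          simp only [Bool.and_eq_true, decide_eq_true_eq] at hi2'
          exact ⟨i', List.mem_range.mp hi1', hi2'.1.1, hi2'.1.2, hi2'.2⟩
        obtain ⟨i', hi'1, hi'2, hi'3, hi'4⟩ := hpy'
        obtain ⟨i, hle, h0, hltm, hPi, hlo', hhi'⟩ :=
          H (i' : Int) (mm : Int) y x (by omega) (by omega) hi'2 hi'3 hi'4
            (by omega) (by omega) hP hx1 hx2 hxy
        have : pvCov P lo hi mm x = true := by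
          unfold pvCov
          rw [List.any_eq_true]
          refine ⟨i.toNat, List.mem_range.mpr (by omega), ?_⟩
          have hcast : ((i.toNat : Nat) : Int) = i := by omega
          rw [hcast]
          simp [hPi, hlo', hhi']
        rw [this] at hxcov
        cases hxcov
      congr 1
      have hlo0 : max 0 (lo (mm : Int)) = lo (mm : Int) := by
        have := hB (mm : Int) (by omega) (by omega) hP
        omega
      have hhin : min (m : Int) (hi (mm : Int)) = hi (mm : Int) := by
        have := hB (mm : Int) (by omega) (by omega) hP
        omega
      have hbetween : (PySem.List.pyRange 0 (m : Int)).filter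
          (fun j => decide (lo (mm : Int) ≤ j) && decide (j < hi (mm : Int)))
          = PySem.List.pyRange (lo (mm : Int)) (hi (mm : Int)) := by
        rw [pv_pyRange_filter_between, hlo0, hhin]
      rw [← hbetween, List.filter_filter]
      apply List.filter_congr
      intro a _
      exact Bool.and_comm _ _
    · rw [if_neg hP, List.append_nil, ihe]
      apply List.filter_congr
      intro j _
      have hP' : P (mm : Int) = false := by
        cases h : P (mm : Int) with
        | false => rfl
        | true => exact absurd h hP
      rw [hcov j, hP']
      simp

theorem pv_update_replicate (n : Nat) (a : Int) (s : PySem.Set Int) (hn : n ≠ 0) :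
    PySem.Set.update s (List.replicate n a) = s.add a := by
  induction n generalizing s with
  | zero => exact absurd rfl hn
  | succ nn ih =>
    rw [List.replicate_succ, PySem.Set.update_cons]
    by_cases h0 : nn = 0
    · rw [h0, List.replicate_zero, PySem.Set.update_nil]
    · rw [ih _ h0, PySem.Set.add_of_mem ((PySem.Set.mem_add _ _ _).mpr (Or.inr rfl))]

theorem pv_ofList_gath (c : Int → Nat) (m : Nat) :
    PySem.Set.ofList (pvGath c m)
      = ((List.range m).map (fun (k : Nat) => (k : Int))).filter (fun j => decide (c j ≠ 0)) := by
  induction m with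
  | zero => rfl
  | succ m ih =>
    have hsplit : pvGath c (m+1) = pvGath c m ++ List.replicate (c (m : Int)) ((m : Int)) := by
      rw [pvGath, List.range_succ, List.flatMap_append, ← pvGath]
      simp
    rw [hsplit, PySem.Set.ofList_append, List.range_succ, List.map_append, List.filter_append]
    by_cases hc : c (m : Int) = 0
    · rw [hc, List.replicate_zero, PySem.Set.update_nil, ih]
      simp [hc]
    · rw [pv_update_replicate _ _ _ hc]
      have hnotmem : ((m : Int)) ∉ PySem.Set.ofList (pvGath c m) := by
        rw [PySem.Set.mem_ofList]
        intro hmem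
        rw [pvGath, List.mem_flatMap] at hmem
        obtain ⟨k, hk1, hk2⟩ := hmem
        have hmk : ((m : Int)) = ((k : Int)) := List.eq_of_mem_replicate hk2
        have := List.mem_range.mp hk1
        omega
      rw [PySem.Set.add_of_not_mem hnotmem, ih]
      simp [hc]

-- dedup commutes with mapping through f (first occurrences of values are at first occurrences of indices)
theorem pv_ofList_map_ofList {α β : Type} [BEq α] [LawfulBEq α] [BEq β] [LawfulBEq β]
    (f : α → β) (l : List α) :
    PySem.Set.ofList (l.map f) = PySem.Set.ofList ((PySem.Set.ofList l).map f) := by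
  induction l using List.reverseRecOn with
  | nil => rfl
  | append_singleton l x ih =>
    rw [List.map_append, List.map_singleton, PySem.Set.ofList_append_singleton,
        PySem.Set.ofList_append_singleton]
    by_cases hx : x ∈ PySem.Set.ofList l
    · rw [PySem.Set.add_of_mem hx]
      have hfx : f x ∈ PySem.Set.ofList (l.map f) :=
        (PySem.Set.mem_ofList _ _).mpr (List.mem_map_of_mem ((PySem.Set.mem_ofList _ _).mp hx))
      rw [PySem.Set.add_of_mem hfx, ih]
    · rw [PySem.Set.add_of_not_mem hx, List.map_append, List.map_singleton,
          PySem.Set.ofList_append_singleton, ih]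

-- two multiplicity-and-first-occurrence-equal lists have the same Counter
theorem pv_counter_eq_of (l1 l2 : List String) (hp : l1.Perm l2)
    (hs : PySem.Set.ofList l1 = PySem.Set.ofList l2) :
    PySem.Dict.counter l1 = PySem.Dict.counter l2 := by
  apply PySem.Dict.ext
  rw [PySem.Dict.items_counter, PySem.Dict.items_counter, hs]
  apply List.map_congr_left
  intro k _
  rw [hp.count_eq]

-- ---------- counter-level heart: scatter order and gather order build the same Counter ----------

theorem pv_main (P : Int → Bool) (lo hi : Int → Int) (c : Int → Nat) (f : Int → String) (m : Nat)
    (hB : ∀ i : Int, 0 ≤ i → i < (m : Int) → P i = true → 0 ≤ lo i ∧ hi i ≤ (m : Int))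
    (H : ∀ (i1 i2 j1 j2 : Int), 0 ≤ i1 → i1 < (m : Int) → P i1 = true → lo i1 ≤ j1 → j1 < hi i1 →
        0 ≤ i2 → i2 < (m : Int) → P i2 = true → lo i2 ≤ j2 → j2 < hi i2 → j2 < j1 →
        ∃ i : Int, i ≤ i1 ∧ 0 ≤ i ∧ i < (m : Int) ∧ P i = true ∧ lo i ≤ j2 ∧ j2 < hi i)
    (Hc : ∀ k : Nat, k < m → c (k : Int)
        = ((List.range m).filter (fun (i : Nat) => P (i : Int) && decide (lo (i : Int) ≤ (k : Int)) && decide ((k : Int) < hi (i : Int)))).length) :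
    PySem.Dict.counter ((pvScat P lo hi m).map f) = PySem.Dict.counter ((pvGath c m).map f) := by
  apply pv_counter_eq_of
  · exact (pv_scat_perm_gath P lo hi c m hB Hc).map f
  · rw [pv_ofList_map_ofList f (pvScat P lo hi m), pv_ofList_map_ofList f (pvGath c m)]
    rw [pv_ofList_scat P lo hi m hB H m le_rfl, pv_ofList_gath c m]
    congr 1
    rw [← PySem.List.pyRange_zero_natCast]
    congr 1
    apply List.filter_congr
    intro j hj
    rw [PySem.List.mem_pyRange_one] at hj
    have hk : j = ((j.toNat : Nat) : Int) := by omega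
    rw [Bool.eq_iff_iff]
    rw [hk, Hc j.toNat (by omega)]
    simp only [pvCov, List.any_eq_true, Bool.and_eq_true, decide_eq_true_eq]
    constructor
    · rintro ⟨i, h1, ⟨h2, h3⟩, h4⟩
      intro hlen
      have hmem : i ∈ (List.range m).filter
          (fun (i : Nat) => P (i:Int) && decide (lo (i:Int) ≤ ((j.toNat : Nat):Int)) && decide (((j.toNat : Nat):Int) < hi (i:Int))) :=
        List.mem_filter.mpr ⟨h1, by simp only [Bool.and_eq_true, decide_eq_true_eq]; exact ⟨⟨h2, h3⟩, h4⟩⟩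
      rw [List.length_eq_zero_iff] at hlen
      rw [hlen] at hmem
      cases hmem
    · intro h
      have hne : (List.range m).filter
          (fun (i : Nat) => P (i:Int) && decide (lo (i:Int) ≤ ((j.toNat : Nat):Int)) && decide (((j.toNat : Nat):Int) < hi (i:Int))) ≠ [] := by
        intro hnil
        exact h (by rw [hnil]; rfl)
      obtain ⟨i, hi'⟩ := List.exists_mem_of_ne_nil _ hne
      have h2 := List.of_mem_filter hi'
      simp only [Bool.and_eq_true, decide_eq_true_eq] at h2
      exact ⟨i, List.mem_of_mem_filter hi', ⟨h2.1.1, h2.1.2⟩, h2.2⟩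

-- ---------- Dict.modify accumulation = repeated counting ----------

theorem pv_modify_modify (d : PySem.Dict String Int) (k : String) (a b : Int) :
    (d.modify k 0 (· + a)).modify k 0 (· + b) = d.modify k 0 (· + (a + b)) := by
  simp only [PySem.Dict.modify, PySem.Dict.getD_insert_self, PySem.Dict.insert_insert_self, add_assoc]

theorem pv_modify_replicate (d : PySem.Dict String Int) (k : String) (m : Nat) (hm : m ≠ 0) :
    (List.replicate m k).foldl (fun d x => d.modify x 0 (· + 1)) d = d.modify k 0 (· + (m : Int)) := by
  induction m generalizing d with
  | zero => exact absurd rfl hm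
  | succ mm ih =>
    rw [List.replicate_succ, List.foldl_cons]
    by_cases h0 : mm = 0
    · subst h0
      rw [List.replicate_zero, List.foldl_nil]
      norm_num
    · rw [ih _ h0, pv_modify_modify]
      congr 1
      funext x
      push_cast
      ring

-- ---------- B's prefix-sum list and its reading ----------

theorem pv_prefix_eq (wl : List String) (t : String) :
    wl.foldl (fun (st : List Int × Int) w =>
        (st.1 ++ [st.2 + (if w == t then 1 else 0)], st.2 + (if w == t then 1 else 0)))
      ([(0 : Int)], 0)
    = ((List.range (wl.length + 1)).map (fun (k : Nat) => ((wl.take k).countP (fun x => x == t) : Int)),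
       (wl.countP (fun x => x == t) : Int)) := by
  induction wl using List.reverseRecOn with
  | nil => simp
  | append_singleton l x ih =>
    rw [List.foldl_append, ih]
    simp only [List.foldl_cons, List.foldl_nil]
    rw [Prod.mk.injEq]
    refine ⟨?_, ?_⟩
    · have hr : List.range ((l ++ [x]).length + 1) = List.range (l.length + 1) ++ [l.length + 1] := by
        rw [List.length_append, List.length_singleton]
        exact List.range_succ
      rw [hr, List.map_append]
      congr 1
      · apply List.map_congr_left
        intro k hk
        have hk' := List.mem_range.mp hk
        rw [List.take_append_of_le_length (by omega)]
      · rw [List.map_singleton, List.take_of_length_le (by simp), List.countP_append]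
        have hone : List.countP (fun x_1 => x_1 == t) [x] = if (x == t) = true then 1 else 0 := by
          simp [List.countP_cons]
        rw [hone]
        cases h : (x == t) <;> simp [h]
    · rw [List.countP_append]
      have hone : List.countP (fun x_1 => x_1 == t) [x] = if (x == t) = true then 1 else 0 := by
        simp [List.countP_cons]
      rw [hone]
      cases h : (x == t) <;> simp [h]

theorem pv_pyGetD_prefix (wl : List String) (t : String) (j : Int) (h0 : 0 ≤ j) (h1 : j ≤ (wl.length : Int)) :
    PySem.List.pyGetD ((List.range (wl.length + 1)).map (fun (k : Nat) => ((wl.take k).countP (fun x => x == t) : Int))) j 0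
      = ((wl.take j.toNat).countP (fun x => x == t) : Int) := by
  rw [PySem.List.pyGetD_eq_getElem _ _ h0 (by simp only [List.length_map, List.length_range]; omega)]
  rw [List.getElem_map, List.getElem_range]

theorem pv_countP_take (wl : List String) (q : String → Bool) (k : Nat) (hk : k ≤ wl.length) :
    (wl.take k).countP q = ((List.range k).filter (fun (i : Nat) => q (PySem.List.pyGetD wl (i : Int) ""))).length := by
  induction k with
  | zero => rfl
  | succ kk ih =>
    have hlt : kk < wl.length := by omega
    rw [List.take_add_one, List.countP_append, ih (by omega), List.range_succ, List.filter_append,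
        List.length_append]
    congr 1
    rw [List.getElem?_eq_getElem hlt]
    have hget2 : wl[kk]?.getD "" = wl[kk] := by
      rw [List.getElem?_eq_getElem hlt]
      rfl
    cases h : q wl[kk] <;> simp [hget2, h]

theorem pv_seg (wl : List String) (q : String → Bool) (a b : Nat) (hab : a ≤ b) (hbm : b ≤ wl.length) :
    ((wl.take b).countP q : Int) - ((wl.take a).countP q : Int)
      = (((List.range wl.length).filter (fun (i : Nat) => decide (a ≤ i) && decide (i < b) && q (PySem.List.pyGetD wl (i : Int) ""))).length : Int) := by
  rw [pv_countP_take wl q b hbm, pv_countP_take wl q a (by omega)]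
  have key : ((List.range b).filter (fun (i : Nat) => q (PySem.List.pyGetD wl (i : Int) ""))).length
      = ((List.range a).filter (fun (i : Nat) => q (PySem.List.pyGetD wl (i : Int) ""))).length
        + ((List.range wl.length).filter (fun (i : Nat) => decide (a ≤ i) && decide (i < b) && q (PySem.List.pyGetD wl (i : Int) ""))).length := by
    have h2 : List.range wl.length = List.range b ++ (List.range (wl.length - b)).map (fun x => b + x) := by
      rw [← List.range_add]
      congr 1
      omega
    rw [h2, List.filter_append, List.length_append]
    have hz : ((List.range (wl.length - b)).map (fun x => b + x)).filter
        (fun (i : Nat) => decide (a ≤ i) && decide (i < b) && q (PySem.List.pyGetD wl (i : Int) "")) = [] := by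
      apply List.filter_eq_nil_iff.mpr
      intro i hi
      obtain ⟨x, _, hx⟩ := List.mem_map.mp hi
      subst hx
      simp only [Bool.and_eq_true, decide_eq_true_eq]
      rintro ⟨⟨_, hlt⟩, _⟩
      omega
    rw [hz, List.length_nil, Nat.add_zero]
    have h1 : List.range b = List.range a ++ (List.range (b - a)).map (fun x => a + x) := by
      rw [← List.range_add]
      congr 1
      omega
    rw [h1, List.filter_append, List.length_append, List.filter_append, List.length_append]
    have hz2 : (List.range a).filter
        (fun (i : Nat) => decide (a ≤ i) && decide (i < b) && q (PySem.List.pyGetD wl (i : Int) "")) = [] := by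
      apply List.filter_eq_nil_iff.mpr
      intro i hi
      have := List.mem_range.mp hi
      simp only [Bool.and_eq_true, decide_eq_true_eq]
      rintro ⟨⟨hle, _⟩, _⟩
      omega
    rw [hz2, List.length_nil, Nat.zero_add]
    congr 1
    rw [List.filter_map, List.filter_map, List.length_map, List.length_map]
    congr 1
    apply List.filter_congr
    intro x hx
    have hxlt := List.mem_range.mp hx
    simp only [Function.comp_apply]
    rw [show (decide (a ≤ a + x)) = true by simp, show (decide (a + x < b)) = true by simp; omega]
    simp
  rw [key]
  push_cast
  ring

-- ---------- reading A's loop as a counter of the scatter list ----------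

theorem pv_A_side (wl : List String) (t : String) (lo hi : Int → Int) :
    (PySem.List.enumerate wl 0).foldl
      (fun (d : PySem.Dict String Int) p =>
        if p.2 == t then
          (PySem.List.pyRange (lo p.1) (hi p.1)).foldl
            (fun d j => d.modify (PySem.List.pyGetD wl j "") 0 (· + 1)) d
        else d) PySem.Dict.empty
    = PySem.Dict.counter ((pvScat (fun i => PySem.List.pyGetD wl i "" == t) lo hi wl.length).map
        (fun j => PySem.List.pyGetD wl j "")) := by
  rw [pv_foldl_if_flatMap]
  have hlist : ((PySem.List.enumerate wl 0).filter (fun p => p.2 == t)).flatMap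
      (fun p => PySem.List.pyRange (lo p.1) (hi p.1))
      = pvScat (fun i => PySem.List.pyGetD wl i "" == t) lo hi wl.length := by
    rw [PySem.List.enumerate_eq_map_pyRange wl "", List.filter_map, List.flatMap_map,
        pv_flatMap_filter]
    have hrange : PySem.List.pyRange 0 (PySem.List.len wl)
        = List.map (fun (k : Nat) => (k : Int)) (List.range wl.length) := by
      rw [PySem.List.len_eq, PySem.List.pyRange_zero_natCast]
    rw [hrange, List.flatMap_map]
    rfl
  rw [hlist, PySem.Dict.counter_eq_foldl, List.foldl_map]

-- ---------- reading B's loop as a counter of the gather list ----------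

theorem pv_B_side (wl : List String) (cB : Int → Int)
    (hpos : ∀ k : Nat, k < wl.length → 0 ≤ cB (k : Int)) :
    (PySem.List.enumerate wl 0).foldl
      (fun (d : PySem.Dict String Int) p => if cB p.1 ≠ 0 then d.modify p.2 0 (· + cB p.1) else d)
      PySem.Dict.empty
    = PySem.Dict.counter ((pvGath (fun j => (cB j).toNat) wl.length).map (fun j => PySem.List.pyGetD wl j "")) := by
  rw [PySem.List.enumerate_eq_map_pyRange wl "", List.foldl_map]
  have hrange : PySem.List.pyRange 0 (PySem.List.len wl)
      = List.map (fun (k : Nat) => (k : Int)) (List.range wl.length) := by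
    rw [PySem.List.len_eq, PySem.List.pyRange_zero_natCast]
  rw [hrange, List.foldl_map]
  have hmap : (pvGath (fun j => (cB j).toNat) wl.length).map (fun j => PySem.List.pyGetD wl j "")
      = (List.range wl.length).flatMap
          (fun (k : Nat) => List.replicate ((cB (k : Int)).toNat) (PySem.List.pyGetD wl (k : Int) "")) := by
    rw [pvGath, List.map_flatMap]
    simp [List.map_replicate]
  rw [PySem.Dict.counter_eq_foldl, hmap, pv_foldl_flatMap]
  apply PySem.List.foldl_congr_mem
  intro acc k hk
  have hk' := List.mem_range.mp hk
  by_cases hc : cB (k : Int) = 0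
  · simp [hc]
  · rw [if_pos hc, pv_modify_replicate _ _ _ (by have := hpos k hk'; omega),
        Int.toNat_of_nonneg (hpos k hk')]

-- ===== VERDICT (by name: the statement is the Claim_ definition above) =====
theorem analyze_collocations_spec : Claim_equal_analyze_collocations := by
  intro words_data target_word window _ _
  unfold Spec_analyze_collocations analyze_collocations analyze_collocations_alt
  simp only [PySem.List.len_eq]
  set wl := words_data.map (fun wd => (PySem.Dict.mk wd).getD "word" "") with hwl
  set t := target_word with ht
  set w := window with hvw
  rw [pv_prefix_eq wl t]
  simp only []
  set m := wl.length with hm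
  set win := max w 0 with hwin
  clear_value win
  set pfxL := (List.range (m + 1)).map (fun (k : Nat) => ((wl.take k).countP (fun x => x == t) : Int)) with hpfx
  set cR := fun (j : Int) => PySem.List.pyGetD pfxL (min (m : Int) (j + win + 1)) 0 - PySem.List.pyGetD pfxL (j + 1) 0 with hcR
  set cL := fun (j : Int) => PySem.List.pyGetD pfxL j 0 - PySem.List.pyGetD pfxL (max 0 (j - win)) 0 with hcL
  -- the count functions read off the prefix list as segment filters
  have hvalR : ∀ k : Nat, k < m → cR (k : Int)
      = (((List.range m).filter (fun (i : Nat) => (PySem.List.pyGetD wl (i : Int) "" == t) && decide (max 0 ((i : Int) - w) ≤ (k : Int)) && decide ((k : Int) < (i : Int)))).length : Int) := by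
    intro k hk
    have hb0 : (0 : Int) ≤ min (m : Int) ((k : Int) + win + 1) := by omega
    have hbm : min (m : Int) ((k : Int) + win + 1) ≤ (m : Int) := by omega
    rw [hcR]
    simp only []
    rw [hpfx, hm] at *
    rw [pv_pyGetD_prefix wl t _ hb0 hbm, pv_pyGetD_prefix wl t _ (by omega) (by omega)]
    have ha : (((k : Int) + 1)).toNat = k + 1 := by omega
    rw [ha]
    have habI : ((min (m : Int) ((k : Int) + win + 1)).toNat : Int) = min (m : Int) ((k : Int) + win + 1) := by omega
    rw [pv_seg wl (fun x => x == t) (k + 1) ((min (m : Int) ((k : Int) + win + 1)).toNat) (by omega) (by omega)]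
    congr 1
    congr 1
    apply List.filter_congr
    intro i hi
    have hi' := List.mem_range.mp hi
    cases hq : (PySem.List.pyGetD wl (i : Int) "" == t)
    · simp [hq]
    · rw [Bool.eq_iff_iff]
      simp only [Bool.and_eq_true, decide_eq_true_eq, hq, Bool.and_true, and_true, true_and]
      omega
  have hvalL : ∀ k : Nat, k < m → cL (k : Int)
      = (((List.range m).filter (fun (i : Nat) => (PySem.List.pyGetD wl (i : Int) "" == t) && decide ((i : Int) + 1 ≤ (k : Int)) && decide ((k : Int) < min (m : Int) ((i : Int) + w + 1)))).length : Int) := by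
    intro k hk
    have ha0 : (0 : Int) ≤ max 0 ((k : Int) - win) := by omega
    have ham : max 0 ((k : Int) - win) ≤ (m : Int) := by omega
    rw [hcL]
    simp only []
    rw [hpfx, hm] at *
    rw [pv_pyGetD_prefix wl t _ (by omega) (by omega), pv_pyGetD_prefix wl t _ ha0 ham]
    have hb : ((k : Int)).toNat = k := by omega
    rw [hb]
    have haI : ((max 0 ((k : Int) - win)).toNat : Int) = max 0 ((k : Int) - win) := by omega
    rw [pv_seg wl (fun x => x == t) ((max 0 ((k : Int) - win)).toNat) k (by omega) (by omega)]
    congr 1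
    congr 1
    apply List.filter_congr
    intro i hi
    have hi' := List.mem_range.mp hi
    cases hq : (PySem.List.pyGetD wl (i : Int) "" == t)
    · simp [hq]
    · rw [Bool.eq_iff_iff]
      simp only [Bool.and_eq_true, decide_eq_true_eq, hq, Bool.and_true, and_true, true_and]
      omega
  have hposR : ∀ k : Nat, k < m → 0 ≤ cR (k : Int) := by
    intro k hk
    rw [hvalR k hk]
    exact Int.natCast_nonneg _
  have hposL : ∀ k : Nat, k < m → 0 ≤ cL (k : Int) := by
    intro k hk
    rw [hvalL k hk]
    exact Int.natCast_nonneg _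
  -- split both pair-state folds
  rw [pv_foldl_pair_split (PySem.List.enumerate wl 0) (fun p => p.2 == t)
        (fun (d : PySem.Dict String Int) (p : Int × String) =>
          (PySem.List.pyRange (max 0 (p.1 - w)) p.1).foldl
            (fun d j => d.modify (PySem.List.pyGetD wl j "") 0 (· + 1)) d)
        (fun (d : PySem.Dict String Int) (p : Int × String) =>
          (PySem.List.pyRange (p.1 + 1) (min (m : Int) (p.1 + w + 1))).foldl
            (fun d j => d.modify (PySem.List.pyGetD wl j "") 0 (· + 1)) d)
        PySem.Dict.empty PySem.Dict.empty]
  rw [PySem.List.foldl_prod_mk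
        (f := fun (d : PySem.Dict String Int) (p : Int × String) =>
          if cR p.1 ≠ 0 then d.modify p.2 0 (· + cR p.1) else d)
        (g := fun (d : PySem.Dict String Int) (p : Int × String) =>
          if cL p.1 ≠ 0 then d.modify p.2 0 (· + cL p.1) else d)]
  have h1 :
      (PySem.List.enumerate wl 0).foldl
        (fun (d : PySem.Dict String Int) p =>
          if p.2 == t then
            (PySem.List.pyRange (max 0 (p.1 - w)) p.1).foldl
              (fun d j => d.modify (PySem.List.pyGetD wl j "") 0 (· + 1)) d
          else d) PySem.Dict.empty
      = (PySem.List.enumerate wl 0).foldl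
        (fun (d : PySem.Dict String Int) p => if cR p.1 ≠ 0 then d.modify p.2 0 (· + cR p.1) else d)
        PySem.Dict.empty := by
    rw [pv_A_side wl t (fun i => max 0 (i - w)) (fun i => i),
        pv_B_side wl cR hposR]
    apply pv_main
    · intro i h0 h1' _
      refine ⟨by omega, by omega⟩
    · intro i1 i2 j1 j2 h1a h1b hP1 hlo1 hhi1 h2a h2b hP2 hlo2 hhi2 hlt
      by_cases hc : i2 ≤ i1
      · exact ⟨i2, hc, h2a, h2b, hP2, hlo2, hhi2⟩
      · exact ⟨i1, le_refl _, h1a, h1b, hP1, by omega, by omega⟩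
    · intro k hk
      rw [hvalR k hk, Int.toNat_natCast]
  have h2 :
      (PySem.List.enumerate wl 0).foldl
        (fun (d : PySem.Dict String Int) p =>
          if p.2 == t then
            (PySem.List.pyRange (p.1 + 1) (min (m : Int) (p.1 + w + 1))).foldl
              (fun d j => d.modify (PySem.List.pyGetD wl j "") 0 (· + 1)) d
          else d) PySem.Dict.empty
      = (PySem.List.enumerate wl 0).foldl
        (fun (d : PySem.Dict String Int) p => if cL p.1 ≠ 0 then d.modify p.2 0 (· + cL p.1) else d)
        PySem.Dict.empty := by
    rw [pv_A_side wl t (fun i => i + 1) (fun i => min (m : Int) (i + w + 1)),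
        pv_B_side wl cL hposL]
    apply pv_main
    · intro i h0 h1' _
      refine ⟨by omega, by omega⟩
    · intro i1 i2 j1 j2 h1a h1b hP1 hlo1 hhi1 h2a h2b hP2 hlo2 hhi2 hlt
      by_cases hc : i2 ≤ i1
      · exact ⟨i2, hc, h2a, h2b, hP2, hlo2, hhi2⟩
      · exact ⟨i1, le_refl _, h1a, h1b, hP1, by omega, by omega⟩
    · intro k hk
      rw [hvalL k hk, Int.toNat_natCast]
  rw [h1, h2]
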